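-- pv_equiv track=rewrite | github.com/abodezoabi/EX1_newspace | part3.py | vote_star_matches
-- ===== SOURCE A (Python) =====
-- def vote_star_matches(triangle_matches):
--     votes = {}
--     for t1, t2 in triangle_matches:
--         for i, j in zip(t1, t2):
--             votes[(i, j)] = votes.get((i, j), 0) + 1
--
--     final_matches = []
--     used1, used2 = set(), set()
--     for (i, j), count in sorted(votes.items(), key=lambda x: -x[1]):
--         if i not in used1 and j not in used2:
--             final_matches.append((i, j))
--             used1.add(i)
--             used2.add(j)
--     return final_matches
-- ===== SOURCE B (Python) =====
-- def vote_star_matches(triangle_matches):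
--     votes = {}
--     for t1, t2 in triangle_matches:
--         for i, j in zip(t1, t2):
--             votes[(i, j)] = votes.get((i, j), 0) + 1
--
--     # repeated extraction: pick the globally best remaining pair (highest vote
--     # count, earliest insertion on ties), then discard every conflicting pair.
--     items = list(votes.items())
--     final_matches = []
--     while items:
--         (i, j), _ = max(items, key=lambda x: x[1])
--         final_matches.append((i, j))
--         items = [p for p in items if p[0][0] != i and p[0][1] != j]
--     return final_matches
-- ===== Notes on version B (the rewrite author's own statement) =====
-- stated objective: alternative
-- what changed: Replaces A's sort-then-scan greedy (stable sort of all vote items by -count plus used1/used2 sets) with repeated extraction: pick the globally best remaining pair with max(items, key=count) (first maximal on ties), append it, and filter out every pair sharing its row or column; no sort and no used sets.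
import Mathlib
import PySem

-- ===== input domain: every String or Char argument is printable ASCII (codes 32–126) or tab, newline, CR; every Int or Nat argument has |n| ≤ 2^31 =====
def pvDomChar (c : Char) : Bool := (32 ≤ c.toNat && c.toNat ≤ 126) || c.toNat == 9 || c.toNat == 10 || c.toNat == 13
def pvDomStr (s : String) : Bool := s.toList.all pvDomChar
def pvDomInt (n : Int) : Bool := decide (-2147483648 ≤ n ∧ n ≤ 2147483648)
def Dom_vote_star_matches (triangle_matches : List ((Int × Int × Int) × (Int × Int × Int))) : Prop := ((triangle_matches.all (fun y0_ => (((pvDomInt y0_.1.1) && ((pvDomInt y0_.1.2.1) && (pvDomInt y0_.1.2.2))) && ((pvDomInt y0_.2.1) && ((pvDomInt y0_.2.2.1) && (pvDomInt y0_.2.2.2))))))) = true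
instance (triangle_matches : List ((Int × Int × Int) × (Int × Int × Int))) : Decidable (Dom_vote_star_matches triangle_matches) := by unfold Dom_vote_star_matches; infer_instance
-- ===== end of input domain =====

-- B replaces A's sort-then-scan greedy (stable sort by -count + used1/used2 sets) with
-- repeated extraction: take the first maximal remaining pair, filter out conflicts, repeat.


-- ===== PORT A =====
-- votes[(i,j)] = votes.get((i,j),0)+1 over zip(t1,t2) (three pairs); then the greedy loop over
-- sorted(votes.items(), key=lambda x: -x[1]) with used1/used2 sets.
def vote_star_matches (triangle_matches : List ((Int × Int × Int) × (Int × Int × Int))) : List (Int × Int) :=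
  let votes : PySem.Dict (Int × Int) Int :=
    triangle_matches.foldl (fun d t =>
      [(t.1.1, t.2.1), (t.1.2.1, t.2.2.1), (t.1.2.2, t.2.2.2)].foldl
        (fun d p => d.insert p (d.getD p 0 + 1)) d) PySem.Dict.empty
  let st := (PySem.List.sorted votes.items (fun x => -x.2) false).foldl
    (fun (st : List (Int × Int) × PySem.Set Int × PySem.Set Int) q =>
      if !(PySem.Set.contains st.2.1 q.1.1) && !(PySem.Set.contains st.2.2 q.1.2) then
        (st.1 ++ [q.1], PySem.Set.add st.2.1 q.1.1, PySem.Set.add st.2.2 q.1.2)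
      else st) ([], PySem.Set.empty, PySem.Set.empty)
  st.1

-- ===== PORT B =====
-- filtering out the selected max strictly shrinks `items`: termination of the while loop
theorem pvFilter_lt' {α : Type} (l : List α) (p : α → Bool) (b : α) (hb : b ∈ l)
    (hpb : p b = false) : (l.filter p).length < l.length := by
  induction l with
  | nil => cases hb
  | cons a l ih =>
    rw [List.filter_cons]
    rcases List.mem_cons.mp hb with rfl | hbl
    · rw [hpb]
      have := List.length_filter_le p l
      simpa using Nat.lt_succ_of_le this
    · by_cases hpa : p a = true
      · rw [if_pos hpa]
        simpa using Nat.succ_lt_succ (ih hbl)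
      · rw [if_neg hpa]
        exact Nat.lt_succ_of_lt (ih hbl)


-- while items: (i,j),_ = max(items, key=lambda x: x[1]); append; items = [p for p in items if …]
def pvSelect (items : List ((Int × Int) × Int)) : List (Int × Int) :=
  match h : PySem.List.max? items (fun x => x.2) with
  | none => []
  | some b => b.1 :: pvSelect (items.filter (fun p => decide (p.1.1 ≠ b.1.1 ∧ p.1.2 ≠ b.1.2)))
termination_by items.length
decreasing_by
  have hmem : b ∈ items := PySem.List.max?_mem h
  simp only [List.length_unattach]
  have hlt := pvFilter_lt' items.attach
    (fun x => decide ((x.1).1.1 ≠ b.1.1 ∧ (x.1).1.2 ≠ b.1.2)) ⟨b, hmem⟩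
    (List.mem_attach _ _) (by simp)
  simpa using hlt

-- same vote tally as A (it is the same Python code); then the repeated-extraction loop
def vote_star_matches_alt (triangle_matches : List ((Int × Int × Int) × (Int × Int × Int))) : List (Int × Int) :=
  let votes : PySem.Dict (Int × Int) Int :=
    triangle_matches.foldl (fun d t =>
      [(t.1.1, t.2.1), (t.1.2.1, t.2.2.1), (t.1.2.2, t.2.2.2)].foldl
        (fun d p => d.insert p (d.getD p 0 + 1)) d) PySem.Dict.empty
  pvSelect votes.items

-- ===== PRECONDITION & SPEC =====
def Spec_vote_star_matches (triangle_matches : List ((Int × Int × Int) × (Int × Int × Int))) (out : List (Int × Int)) : Prop := out = vote_star_matches_alt triangle_matches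
instance (triangle_matches : List ((Int × Int × Int) × (Int × Int × Int))) (out : List (Int × Int)) : Decidable (Spec_vote_star_matches triangle_matches out) := by unfold Spec_vote_star_matches; infer_instance

-- ===== CLAIM (what is proved, stated in full; the proofs are below) =====
def Claim_equal_vote_star_matches : Prop := ∀ (triangle_matches : List ((Int × Int × Int) × (Int × Int × Int))), Dom_vote_star_matches triangle_matches → Spec_vote_star_matches triangle_matches (vote_star_matches triangle_matches)

-- ===== LEMMAS AND PROOFS =====

theorem pvFilter_lt (items : List ((Int × Int) × Int)) (b : (Int × Int) × Int)
    (hb : PySem.List.max? items (fun x => x.2) = some b) :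
    (items.filter (fun p => decide (p.1.1 ≠ b.1.1 ∧ p.1.2 ≠ b.1.2))).length < items.length := by
  exact pvFilter_lt' items _ b (PySem.List.max?_mem hb) (by simp)

-- output-only form of A's greedy scan
def pvG : List ((Int × Int) × Int) → PySem.Set Int → PySem.Set Int → List (Int × Int)
  | [], _, _ => []
  | p :: S, u1, u2 =>
    if !(PySem.Set.contains u1 p.1.1) && !(PySem.Set.contains u2 p.1.2) then
      p.1 :: pvG S (PySem.Set.add u1 p.1.1) (PySem.Set.add u2 p.1.2)
    else pvG S u1 u2

theorem pvG_fold (S : List ((Int × Int) × Int)) (acc : List (Int × Int))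
    (u1 u2 : PySem.Set Int) :
    (S.foldl (fun (st : List (Int × Int) × PySem.Set Int × PySem.Set Int) q =>
      if !(PySem.Set.contains st.2.1 q.1.1) && !(PySem.Set.contains st.2.2 q.1.2) then
        (st.1 ++ [q.1], PySem.Set.add st.2.1 q.1.1, PySem.Set.add st.2.2 q.1.2)
      else st) (acc, u1, u2)).1 = acc ++ pvG S u1 u2 := by
  induction S generalizing acc u1 u2 with
  | nil => simp [pvG]
  | cons p S ih =>
    simp only [List.foldl_cons, pvG]
    by_cases h : (!(PySem.Set.contains u1 p.1.1) && !(PySem.Set.contains u2 p.1.2)) = true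
    · rw [if_pos h, if_pos h, ih]; simp
    · rw [if_neg h, if_neg h, ih]

theorem pvSelect_none (items : List ((Int × Int) × Int))
    (h : PySem.List.max? items (fun x => x.2) = none) : pvSelect items = [] := by
  conv_lhs => unfold pvSelect
  split
  · rfl
  · rename_i b heq
    rw [h] at heq
    cases heq

theorem pvSelect_some (items : List ((Int × Int) × Int)) (b : (Int × Int) × Int)
    (h : PySem.List.max? items (fun x => x.2) = some b) :
    pvSelect items
      = b.1 :: pvSelect (items.filter (fun p => decide (p.1.1 ≠ b.1.1 ∧ p.1.2 ≠ b.1.2))) := by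
  conv_lhs => unfold pvSelect
  split
  · rename_i heq
    rw [h] at heq
    cases heq
  · rename_i b' heq
    rw [h] at heq
    injection heq with hbe
    subst hbe
    rfl

theorem pvContains_add (s : PySem.Set Int) (a x : Int) :
    PySem.Set.contains (PySem.Set.add s a) x = (PySem.Set.contains s x || x == a) := by
  simp only [PySem.Set.add, PySem.Set.contains, List.contains_eq_mem]
  by_cases h : a ∈ s
  · rw [if_pos (by simpa using h)]
    by_cases hx : x = a
    · subst hx; simp [h]
    · simp [hx]
  · rw [if_neg (by simpa using h)]
    by_cases hx : x = a
    · subst hx; simp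
    · simp [hx, List.mem_append]

-- the greedy scan only looks at membership of the listed coordinates in the used sets
theorem pvG_congr (S : List ((Int × Int) × Int)) (u1 u2 v1 v2 : PySem.Set Int)
    (h : ∀ p ∈ S, PySem.Set.contains u1 p.1.1 = PySem.Set.contains v1 p.1.1 ∧
                  PySem.Set.contains u2 p.1.2 = PySem.Set.contains v2 p.1.2) :
    pvG S u1 u2 = pvG S v1 v2 := by
  induction S generalizing u1 u2 v1 v2 with
  | nil => rfl
  | cons p S ih =>
    obtain ⟨h1, h2⟩ := h p List.mem_cons_self
    simp only [pvG, h1, h2]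
    split_ifs with hc
    · rw [ih]
      intro q hq
      obtain ⟨g1, g2⟩ := h q (List.mem_cons_of_mem _ hq)
      exact ⟨by rw [pvContains_add, pvContains_add, g1],
             by rw [pvContains_add, pvContains_add, g2]⟩
    · exact ih _ _ _ _ fun q hq => h q (List.mem_cons_of_mem _ hq)

-- elements already conflicting with (sub)sets u1/u2 are skipped by the scan
theorem pvG_skip (S : List ((Int × Int) × Int)) (u1 u2 v1 v2 : PySem.Set Int)
    (h1 : ∀ x, PySem.Set.contains u1 x = true → PySem.Set.contains v1 x = true)
    (h2 : ∀ x, PySem.Set.contains u2 x = true → PySem.Set.contains v2 x = true) :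
    pvG S v1 v2 =
      pvG (S.filter (fun p => !(PySem.Set.contains u1 p.1.1) && !(PySem.Set.contains u2 p.1.2)))
        v1 v2 := by
  induction S generalizing v1 v2 with
  | nil => rfl
  | cons p S ih =>
    by_cases hc : (!(PySem.Set.contains u1 p.1.1) && !(PySem.Set.contains u2 p.1.2)) = true
    · rw [List.filter_cons, if_pos hc]
      simp only [pvG]
      split_ifs with hv
      · rw [ih]
        · intro x hx
          rw [pvContains_add, h1 x hx]
          simp
        · intro x hx
          rw [pvContains_add, h2 x hx]
          simp
      · exact ih _ _ h1 h2
    · rw [List.filter_cons, if_neg hc]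
      have hcases : PySem.Set.contains u1 p.1.1 = true ∨ PySem.Set.contains u2 p.1.2 = true := by
        by_contra hneg
        push_neg at hneg
        obtain ⟨a1, a2⟩ := hneg
        exact hc (by rw [Bool.eq_false_iff.mpr a1, Bool.eq_false_iff.mpr a2]; rfl)
      have hv : (!(PySem.Set.contains v1 p.1.1) && !(PySem.Set.contains v2 p.1.2)) = false := by
        rcases hcases with h | h
        · rw [h1 _ h]
          simp only [Bool.not_true, Bool.false_and]
        · rw [h2 _ h]
          simp only [Bool.not_true, Bool.and_false]
      simp only [pvG, hv, Bool.false_eq_true, if_false]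
      exact ih _ _ h1 h2

-- sorted over a snoc is an insertion (PySem.List.sorted is the insertion-sort fold)
theorem pvSorted_snoc (L : List ((Int × Int) × Int)) (x : (Int × Int) × Int) :
    PySem.List.sorted (L ++ [x]) (fun p => -p.2) false
      = PySem.List.insertBy (fun a b => decide ((-a.2 : Int) < -b.2)) x
          (PySem.List.sorted L (fun p => -p.2) false) := by
  rw [PySem.List.sorted_eq_foldl_insertBy, PySem.List.sorted_eq_foldl_insertBy,
      List.foldl_append, List.foldl_cons, List.foldl_nil]

-- Python max(items, key) is the head of the stable sort by the negated key
theorem pvMax_eq_head_sorted (L : List ((Int × Int) × Int)) :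
    PySem.List.max? L (fun x => x.2) = (PySem.List.sorted L (fun p => -p.2) false).head? := by
  induction L using List.reverseRecOn with
  | nil => rfl
  | append_singleton L x ih =>
    rw [pvSorted_snoc]
    cases hs : PySem.List.sorted L (fun p => -p.2) false with
    | nil =>
      have hL : L = [] := (PySem.List.sorted_eq_nil_iff _ _ _).mp hs
      subst hL; rfl
    | cons m T =>
      have hm : PySem.List.max? L (fun x => x.2) = some m := by
        rw [ih, hs]; rfl
      have hstep : ∀ o : Option ((Int × Int) × Int),
          PySem.List.max? L (fun y => y.2) = o →
          PySem.List.max? (L ++ [x]) (fun y => y.2)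
            = (match o with
               | none => some x
               | some w => if w.2 < x.2 then some x else some w) := by
        intro o ho
        simp only [PySem.List.max?] at ho ⊢
        cases o with
        | none => rw [List.foldl_append, ho, List.foldl_cons, List.foldl_nil]
        | some w => rw [List.foldl_append, ho, List.foldl_cons, List.foldl_nil]
      have hmax : PySem.List.max? (L ++ [x]) (fun y => y.2)
          = if m.2 < x.2 then some x else some m := hstep (some m) hm
      rw [hmax]
      simp only [PySem.List.insertBy]
      by_cases h : m.2 < x.2
      · rw [if_pos h, if_pos (by simp only [decide_eq_true_eq]; omega)]
        rfl
      · rw [if_neg h, if_neg (by simp only [decide_eq_true_eq]; omega)]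
        rfl

-- filtering commutes with inserting into a list sorted nondecreasingly by the key
theorem pvFilter_insertBy (M : List ((Int × Int) × Int)) (x : (Int × Int) × Int)
    (q : ((Int × Int) × Int) → Bool)
    (hM : M.Pairwise (fun a b => (-a.2 : Int) ≤ -b.2)) :
    (PySem.List.insertBy (fun a b => decide ((-a.2 : Int) < -b.2)) x M).filter q
      = if q x then PySem.List.insertBy (fun a b => decide ((-a.2 : Int) < -b.2)) x (M.filter q)
        else M.filter q := by
  induction M with
  | nil =>
    simp only [PySem.List.insertBy, List.filter_cons, List.filter_nil]
  | cons y ys ih =>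
    rcases List.pairwise_cons.mp hM with ⟨hy, hys⟩
    simp only [PySem.List.insertBy]
    by_cases hb : ((-x.2 : Int) < -y.2)
    · rw [if_pos (by simpa using hb)]
      by_cases hqx : q x = true
      · have hfront : PySem.List.insertBy (fun a b => decide ((-a.2 : Int) < -b.2)) x
            ((y :: ys).filter q) = x :: (y :: ys).filter q := by
          cases hf : (y :: ys).filter q with
          | nil => rfl
          | cons z zs =>
            have hz : z ∈ (y :: ys).filter q := hf ▸ List.mem_cons_self
            have hz' : z ∈ y :: ys := List.mem_of_mem_filter hz
            have hle : (-y.2 : Int) ≤ -z.2 := by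
              rcases List.mem_cons.mp hz' with rfl | h
              · omega
              · exact hy z h
            simp only [PySem.List.insertBy]
            rw [if_pos (by simp only [decide_eq_true_eq]; omega)]
        rw [if_pos hqx, List.filter_cons, if_pos hqx, hfront]
      · rw [if_neg hqx, List.filter_cons, if_neg hqx]
    · have hbef : (decide ((-x.2 : Int) < -y.2)) = false := by
        simp only [decide_eq_false_iff_not]; exact hb
      simp only [hbef, Bool.false_eq_true, if_false]
      rw [List.filter_cons, ih hys, List.filter_cons]
      split_ifs <;>
        first
          | rfl
          | simp only [PySem.List.insertBy, hbef, Bool.false_eq_true, if_false]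

-- filtering commutes with the stable sort
theorem pvFilter_sorted (L : List ((Int × Int) × Int)) (q : ((Int × Int) × Int) → Bool) :
    (PySem.List.sorted L (fun p => -p.2) false).filter q
      = PySem.List.sorted (L.filter q) (fun p => -p.2) false := by
  induction L using List.reverseRecOn with
  | nil => rfl
  | append_singleton L x ih =>
    rw [pvSorted_snoc, pvFilter_insertBy _ _ _ (PySem.List.sorted_pairwise L (fun p => -p.2)),
      ih, List.filter_append, List.filter_cons, List.filter_nil]
    split_ifs with hqx
    · rw [pvSorted_snoc]
    · rw [List.append_nil]

-- the scan over the sorted list is the repeated extraction of the first maximum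
theorem pvG_sorted_eq_select (n : Nat) (L : List ((Int × Int) × Int)) (hn : L.length ≤ n) :
    pvG (PySem.List.sorted L (fun p => -p.2) false) PySem.Set.empty PySem.Set.empty
      = pvSelect L := by
  induction n generalizing L with
  | zero =>
    have : L = [] := List.length_eq_zero_iff.mp (Nat.le_zero.mp hn)
    subst this
    rw [pvSelect_none [] rfl]
    rfl
  | succ n ih =>
    cases hs : PySem.List.sorted L (fun p => -p.2) false with
    | nil =>
      have : L = [] := (PySem.List.sorted_eq_nil_iff _ _ _).mp hs
      subst this
      rw [pvSelect_none [] rfl]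
      rfl
    | cons b T =>
      have hmax : PySem.List.max? L (fun x => x.2) = some b := by
        rw [pvMax_eq_head_sorted, hs]; rfl
      have hbL : b ∈ L := PySem.List.max?_mem hmax
      set nc : ((Int × Int) × Int) → Bool :=
        fun p => decide (p.1.1 ≠ b.1.1 ∧ p.1.2 ≠ b.1.2) with hnc
      have hlen : (L.filter nc).length ≤ n := by
        have hlt := pvFilter_lt L b hmax
        rw [← hnc] at hlt
        omega
      have hTfil : PySem.List.sorted (L.filter nc) (fun p => -p.2) false = T.filter nc := by
        rw [← pvFilter_sorted, hs, List.filter_cons_of_neg (by simp [hnc])]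
      -- unfold one step of pvSelect
      rw [pvSelect_some L b hmax, ← hnc, ← ih _ hlen, hTfil]
      -- unfold one step of the scan
      simp only [pvG, PySem.Set.contains, PySem.Set.empty, List.contains_nil, Bool.not_false,
        Bool.and_self, if_true, List.cons.injEq, true_and]
      -- reduce the used sets to a filter, then drop them
      have hadd1 : PySem.Set.add ([] : PySem.Set Int) b.1.1 = [b.1.1] := rfl
      have hadd2 : PySem.Set.add ([] : PySem.Set Int) b.1.2 = [b.1.2] := rfl
      rw [hadd1, hadd2, pvG_skip T [b.1.1] [b.1.2] [b.1.1] [b.1.2] (fun _ h => h) (fun _ h => h)]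
      have hpred : ∀ p ∈ T,
          (!(PySem.Set.contains [b.1.1] p.1.1) && !(PySem.Set.contains [b.1.2] p.1.2)) = nc p := by
        intro p _
        simp [PySem.Set.contains, hnc, eq_comm]
      rw [List.filter_congr hpred]
      apply pvG_congr
      intro p hp
      have hpnc : nc p = true := List.of_mem_filter hp
      rw [hnc] at hpnc
      simp only [decide_eq_true_eq] at hpnc
      constructor <;> simp [PySem.Set.contains, hpnc.1, hpnc.2]

-- ===== VERDICT (by name: the statement is the Claim_ definition above) =====
theorem vote_star_matches_spec : Claim_equal_vote_star_matches := by
  intro tm _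
  show vote_star_matches tm = vote_star_matches_alt tm
  simp only [vote_star_matches, vote_star_matches_alt]
  rw [pvG_fold, List.nil_append]
  exact pvG_sorted_eq_select _ _ (Nat.le_refl _)
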